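-- pv_equiv track=rewrite | github.com/Aaron1011/lcr | lcr.py | permute_chips
-- ===== SOURCE A (Python) =====
-- def permute_chips(players, chips):
--     final = []
--     player = players[0]
--
--     if len(players) == 1:
--         final.append([(player, chips)])
--         return final
--
--     for num_chips in range(chips + 1):
--         #other_players = set(players)
--         #other_players.remove(player)
--         #other_players = iter(players)
--         #next(other_players)
--
--         other_permuts = permute_chips(players[1:], chips - num_chips)
--         for permut in other_permuts:
--             permut.append((player, num_chips))
--             final.append(list(permut))
--
--     return final
-- ===== SOURCE B (Python) =====
-- def permute_chips(players, chips):
--     last = players[-1]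
--     partial = [([], 0)]
--     for p in players[:-1]:
--         partial = [(row + [(p, k)], used + k)
--                    for (row, used) in partial
--                    for k in range(chips - used + 1)]
--     return [[(last, chips - used)] + row[::-1] for (row, used) in partial]
-- ===== Notes on version B (the rewrite author's own statement) =====
-- stated objective: alternative
-- what changed: Replaces A's per-player recursion (recurse on the tail for every count of the head player) by a single iterative forward fold that extends partial assignment rows player by player, tracking chips used, and finalises each row with the last player's remainder.
import Mathlib
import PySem

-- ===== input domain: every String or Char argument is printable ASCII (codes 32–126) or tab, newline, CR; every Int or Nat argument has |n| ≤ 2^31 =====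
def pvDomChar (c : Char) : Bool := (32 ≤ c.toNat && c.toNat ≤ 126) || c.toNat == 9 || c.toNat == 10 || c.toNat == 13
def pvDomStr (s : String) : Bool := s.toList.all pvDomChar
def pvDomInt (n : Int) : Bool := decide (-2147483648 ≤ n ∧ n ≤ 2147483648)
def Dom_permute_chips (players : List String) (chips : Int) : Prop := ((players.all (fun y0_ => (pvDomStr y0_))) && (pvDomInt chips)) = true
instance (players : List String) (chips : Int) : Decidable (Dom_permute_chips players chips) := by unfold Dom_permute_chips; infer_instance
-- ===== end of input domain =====

-- B replaces A's per-player recursion by one forward pass that extends partial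
-- assignments player by player and finalises each with the last player's remainder
-- (iterative, no recursion); return values agree on all non-empty player lists.

-- ===== PORT A =====
-- A: recursion on the player list; for each count of the first player, recurse on
-- the rest and append (player, count) to every returned row.
def permute_chips (players : List String) (chips : Int) : List (List (String × Int)) :=
  match players with
  | [] => []   -- players[0] raises IndexError here; excluded by Pre_
  | player :: rest =>
    if rest = [] then
      [[(player, chips)]]
    else
      (PySem.List.pyRange 0 (chips + 1) 1).foldl
        (fun final num_chips =>
          final ++ (permute_chips rest (chips - num_chips)).map
            (fun permut => permut ++ [(player, num_chips)]))
        []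
termination_by players.length
decreasing_by simp

-- ===== PORT B =====
-- B: one forward fold over players[:-1] building partial assignment rows with the
-- chips used so far, then each row is finalised with the last player's remainder.
def permute_chips_alt (players : List String) (chips : Int) : List (List (String × Int)) :=
  match PySem.List.pyGet? players (-1) with
  | none => []   -- players[-1] raises IndexError; outside Pre_
  | some last =>
    let part :=
      (PySem.List.slice players none (some (-1))).foldl
        (fun part p =>
          part.flatMap (fun ru =>
            (PySem.List.pyRange 0 (chips - ru.2 + 1) 1).map
              (fun k => (ru.1 ++ [(p, k)], ru.2 + k))))
        [(([] : List (String × Int)), (0 : Int))]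
    part.map (fun ru => [(last, chips - ru.2)] ++ ru.1.reverse)

-- ===== PRECONDITION & SPEC =====
-- Pre_: Python A evaluates players[0] first, so it raises IndexError on an empty
-- player list; everything else returns normally.
def Pre_permute_chips (players : List String) (chips : Int) : Prop := players ≠ []
instance (players : List String) (chips : Int) : Decidable (Pre_permute_chips players chips) := by unfold Pre_permute_chips; infer_instance
def pvWitness_permute_chips : List String × Int := (["a", "b"], 3)

def Spec_permute_chips (players : List String) (chips : Int) (out : List (List (String × Int))) : Prop := out = permute_chips_alt players chips
instance (players : List String) (chips : Int) (out : List (List (String × Int))) : Decidable (Spec_permute_chips players chips out) := by unfold Spec_permute_chips; infer_instance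

-- ===== CLAIM (what is proved, stated in full; the proofs are below) =====
def Claim_equal_permute_chips : Prop := ∀ (players : List String) (chips : Int), Dom_permute_chips players chips → Pre_permute_chips players chips → Spec_permute_chips players chips (permute_chips players chips)

-- ===== LEMMAS AND PROOFS =====

-- The step function of B's fold, by name (definitionally the lambda in the port).
def pvStep (chips : Int) (part : List (List (String × Int) × Int)) (p : String) : List (List (String × Int) × Int) :=
  part.flatMap (fun ru =>
    (PySem.List.pyRange 0 (chips - ru.2 + 1) 1).map
      (fun k => (ru.1 ++ [(p, k)], ru.2 + k)))

-- What B's remaining work computes from one partial state (row, used).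
def pvRun (chips : Int) : List String → List (String × Int) → Int → List (List (String × Int))
  | [], _, _ => []
  | [last], row, used => [[(last, chips - used)] ++ row.reverse]
  | p :: q :: rest, row, used =>
      (PySem.List.pyRange 0 (chips - used + 1) 1).flatMap
        (fun k => pvRun chips (q :: rest) (row ++ [(p, k)]) (used + k))

-- A's loop, in flatMap form.
lemma permute_chips_cons (p : String) (rest : List String) (h : rest ≠ []) (chips : Int) :
    permute_chips (p :: rest) chips =
      (PySem.List.pyRange 0 (chips + 1) 1).flatMap
        (fun k => (permute_chips rest (chips - k)).map (fun r => r ++ [(p, k)])) := by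
  rw [permute_chips, if_neg h]
  simp [List.flatMap_def]

-- B's continuation from a single partial state equals A on the remaining chips,
-- with the accumulated (reversed) row appended to every result row.
lemma pvRun_eq (players : List String) (h : players ≠ []) :
    ∀ (chips : Int) (row : List (String × Int)) (used : Int),
      pvRun chips players row used =
        (permute_chips players (chips - used)).map (fun r => r ++ row.reverse) := by
  induction players with
  | nil => exact absurd rfl h
  | cons p rest ih =>
    intro chips row used
    cases rest with
    | nil => simp [pvRun, permute_chips]
    | cons q rest' =>
      rw [pvRun, permute_chips_cons p (q :: rest') (by simp) (chips - used),
        List.map_flatMap]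
      congr 1
      funext k
      rw [ih (by simp) chips (row ++ [(p, k)]) (used + k), List.map_map]
      have hc : chips - (used + k) = chips - used - k := by ring
      rw [hc]
      congr 1
      funext r
      simp [List.append_assoc]

-- B's fold over players[:-1], finalised with the last player, distributes over the
-- seed and equals pvRun on each seed element.
lemma pvFold_eq (players : List String) (h : players ≠ []) (chips : Int) (last : String)
    (hl : players.getLast? = some last) :
    ∀ (seed : List (List (String × Int) × Int)),
      ((players.dropLast.foldl (pvStep chips) seed).map
          (fun ru => [(last, chips - ru.2)] ++ ru.1.reverse))
        = seed.flatMap (fun ru => pvRun chips players ru.1 ru.2) := by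
  induction players with
  | nil => exact absurd rfl h
  | cons p rest ih =>
    intro seed
    cases rest with
    | nil =>
      simp only [List.getLast?_singleton, Option.some.injEq] at hl
      subst hl
      simp only [List.dropLast_singleton, List.foldl_nil, pvRun]
      induction seed with
      | nil => simp
      | cons s t iht => simp_all
    | cons q rest' =>
      have hl' : (q :: rest').getLast? = some last := by
        simpa [List.getLast?_cons_cons] using hl
      rw [List.dropLast_cons_of_ne_nil (by simp), List.foldl_cons,
        ih (by simp) hl' (pvStep chips seed p)]
      show (pvStep chips seed p).flatMap _ = _
      rw [pvStep, List.flatMap_assoc]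
      congr 1
      funext ru
      rw [List.flatMap_map]
      rfl

-- Main equivalence on non-empty player lists.
lemma permute_chips_alt_eq (players : List String) (h : players ≠ []) (chips : Int) :
    permute_chips_alt players chips = permute_chips players chips := by
  obtain ⟨last, hl⟩ : ∃ last, players.getLast? = some last :=
    Option.isSome_iff_exists.mp (List.getLast?_isSome.mpr h)
  have hstep : permute_chips_alt players chips
      = [(([] : List (String × Int)), (0 : Int))].flatMap
          (fun ru => pvRun chips players ru.1 ru.2) := by
    rw [permute_chips_alt, PySem.List.pyGet?_neg_one, hl]
    simp only [PySem.List.slice_to_neg_one]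
    exact pvFold_eq players h chips last hl _
  rw [hstep, List.flatMap_singleton, pvRun_eq players h chips [] 0]
  simp

-- ===== VERDICT (by name: the statement is the Claim_ definition above) =====
theorem permute_chips_spec : Claim_equal_permute_chips := by
  intro players chips _ hpre
  unfold Spec_permute_chips
  exact (permute_chips_alt_eq players hpre chips).symm
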